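-- pv_equiv track=rewrite | github.com/suhyun1019/Algorithm | Programmers/Lv2_귤고르기.py | solution
-- ===== SOURCE A (Python) =====
-- from collections import Counter
--
-- def solution(k, tangerine):
--     ans, cnt = 0, 0
--     counter = Counter(tangerine).most_common()
--     for i in range(len(counter)) :
--         ans+=counter[i][1]
--         if ans>=k :
--             return i+1
--     return cnt
-- ===== SOURCE B (Python) =====
-- from collections import Counter
--
-- def solution(k, tangerine):
--     freq = Counter(tangerine)
--     if not freq:
--         return 0
--     cnt_of = Counter(freq.values())
--     total = kinds = 0
--     f = max(freq.values())
--     while f > 0: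
--         for _ in range(cnt_of[f]):
--             total += f
--             kinds += 1
--             if total >= k:
--                 return kinds
--         f -= 1
--     return 0
-- ===== Notes on version B (the rewrite author's own statement) =====
-- stated objective: alternative
-- what changed: Replaces Counter.most_common() sorting plus an indexed scan with a frequency-bucket table (Counter of the counts) walked from the maximal count downwards, incrementing a kind counter per kind until k is reached.
import Mathlib
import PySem

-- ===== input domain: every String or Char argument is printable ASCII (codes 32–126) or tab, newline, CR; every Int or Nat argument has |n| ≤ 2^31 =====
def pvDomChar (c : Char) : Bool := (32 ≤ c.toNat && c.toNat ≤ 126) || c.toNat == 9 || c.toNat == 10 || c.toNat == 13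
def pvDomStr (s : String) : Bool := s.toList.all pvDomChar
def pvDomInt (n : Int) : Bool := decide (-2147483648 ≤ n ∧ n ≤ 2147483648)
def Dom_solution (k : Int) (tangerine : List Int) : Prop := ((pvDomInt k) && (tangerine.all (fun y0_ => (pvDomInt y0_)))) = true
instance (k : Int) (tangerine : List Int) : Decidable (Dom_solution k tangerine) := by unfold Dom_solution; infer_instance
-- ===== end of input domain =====

-- B replaces A's most_common() sort + indexed scan by a bucket walk over Counter(freq.values())
-- from the maximal count downwards (objective: alternative algorithm, not measured faster).

-- ===== PORT A =====
-- the 'for i in range(len(counter))' loop with early return, carrying ans and i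
def solutionGoA (k : Int) (ans : Int) (i : Int) : List (Int × Int) → Int
  | [] => 0
  | (_, c) :: rest =>
    if ans + c ≥ k then i + 1 else solutionGoA k (ans + c) (i + 1) rest

def solution (k : Int) (tangerine : List Int) : Int :=
  let counter := PySem.List.sorted (PySem.Dict.counter tangerine).items (fun kv => kv.2) true
  solutionGoA k 0 0 counter

-- ===== PORT B =====
-- the inner 'for _ in range(cnt_of[f])' loop: .inl = early return, .inr = updated (total, kinds)
def solutionGoBInner (k : Int) (f : Int) : Nat → Int → Int → Sum Int (Int × Int)
  | 0, total, kinds => .inr (total, kinds)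
  | n + 1, total, kinds =>
    if total + f ≥ k then .inl (kinds + 1)
    else solutionGoBInner k f n (total + f) (kinds + 1)

-- the 'while f > 0' loop, f = fN as an Int
def solutionGoB (k : Int) (cntOf : PySem.Dict Int Int) : Nat → Int → Int → Int
  | 0, _, _ => 0
  | fN + 1, total, kinds =>
    match solutionGoBInner k ((fN : Int) + 1) (cntOf.getD ((fN : Int) + 1) 0).toNat total kinds with
    | .inl ans => ans
    | .inr (t, kd) => solutionGoB k cntOf fN t kd

def solution_alt (k : Int) (tangerine : List Int) : Int :=
  let freq := PySem.Dict.counter tangerine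
  match PySem.List.max? freq.values (fun x => x) with
  | none => 0   -- 'if not freq: return 0' (max? is none exactly when freq is empty)
  | some m => solutionGoB k (PySem.Dict.counter freq.values) m.toNat 0 0

-- ===== PRECONDITION & SPEC =====
def Spec_solution (k : Int) (tangerine : List Int) (out : Int) : Prop := out = solution_alt k tangerine
instance (k : Int) (tangerine : List Int) (out : Int) : Decidable (Spec_solution k tangerine out) := by unfold Spec_solution; infer_instance

-- ===== CLAIM (what is proved, stated in full; the proofs are below) =====
def Claim_equal_solution : Prop := ∀ (k : Int) (tangerine : List Int), Dom_solution k tangerine → Spec_solution k tangerine (solution k tangerine)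

-- ===== LEMMAS AND PROOFS =====

-- common scan over a plain list of counts
def pvScan (k : Int) (ans i : Int) : List Int → Int
  | [] => 0
  | c :: cs => if ans + c ≥ k then i + 1 else pvScan k (ans + c) (i + 1) cs

-- A's loop only looks at the second components
theorem goA_eq_scan (k : Int) : ∀ (items : List (Int × Int)) (ans i : Int),
    solutionGoA k ans i items = pvScan k ans i (items.map (·.2)) := by
  intro items
  induction items with
  | nil => intro ans i; rfl
  | cons p rest ih =>
    intro ans i
    cases p with
    | mk a c =>
      simp only [solutionGoA, List.map, pvScan]
      split_ifs <;> simp [ih]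

-- the descending bucket list: counts n, n-1, …, 1 each replicated by its multiplicity in l
def pvDesc (l : List Int) : Nat → List Int
  | 0 => []
  | n + 1 => List.replicate (l.count ((n : Int) + 1)) ((n : Int) + 1) ++ pvDesc l n

theorem scan_replicate (k f : Int) : ∀ (n : Nat) (total kinds : Int) (cs : List Int),
    pvScan k total kinds (List.replicate n f ++ cs) =
      match solutionGoBInner k f n total kinds with
      | .inl a => a
      | .inr (t, kd) => pvScan k t kd cs := by
  intro n
  induction n with
  | zero => intro total kinds cs; rfl
  | succ m ih =>
    intro total kinds cs
    simp only [List.replicate_succ, List.cons_append, pvScan, solutionGoBInner]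
    split_ifs <;> simp [ih]

theorem goB_eq_scan (k : Int) (l : List Int) : ∀ (fN : Nat) (total kinds : Int),
    solutionGoB k (PySem.Dict.counter l) fN total kinds =
      pvScan k total kinds (pvDesc l fN) := by
  intro fN
  induction fN with
  | zero => intro total kinds; rfl
  | succ n ih =>
    intro total kinds
    simp only [solutionGoB, pvDesc, PySem.Dict.getD_counter, Int.toNat_natCast,
      scan_replicate k ((n : Int) + 1) (l.count ((n : Int) + 1)) total kinds]
    cases solutionGoBInner k ((n : Int) + 1) (l.count ((n : Int) + 1)) total kinds with
    | inl a => rfl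
    | inr p => cases p with | mk t kd => simp [ih]

theorem count_pvDesc (l : List Int) : ∀ (n : Nat) (x : Int),
    (pvDesc l n).count x = if 1 ≤ x ∧ x ≤ (n : Int) then l.count x else 0 := by
  intro n
  induction n with
  | zero => intro x; simp [pvDesc]; omega
  | succ m ih =>
    intro x
    simp only [pvDesc, List.count_append, List.count_replicate, beq_iff_eq, ih]
    by_cases hx : x = (m : Int) + 1
    · subst hx
      rw [if_pos rfl]
      push_cast
      split_ifs <;> omega
    · rw [if_neg (fun h => hx h.symm)]
      push_cast
      split_ifs <;> omega

theorem mem_pvDesc (l : List Int) (n : Nat) (x : Int) (hx : x ∈ pvDesc l n) :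
    1 ≤ x ∧ x ≤ (n : Int) := by
  have h := count_pvDesc l n x
  by_contra hc
  rw [if_neg hc] at h
  exact absurd (List.count_eq_zero.mp h) (by simpa using hx)

theorem perm_pvDesc (l : List Int) (n : Nat) (hcov : ∀ x ∈ l, 1 ≤ x ∧ x ≤ (n : Int)) :
    (pvDesc l n).Perm l := by
  apply List.perm_iff_count.mpr
  intro x
  rw [count_pvDesc]
  split_ifs with h
  · rfl
  · by_cases hm : x ∈ l
    · exact absurd (hcov x hm) h
    · simp [List.count_eq_zero.mpr hm]

theorem pairwise_pvDesc (l : List Int) (n : Nat) :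
    (pvDesc l n).Pairwise (fun a b => b ≤ a) := by
  induction n with
  | zero => simp [pvDesc]
  | succ m ih =>
    simp only [pvDesc]
    apply List.pairwise_append.mpr
    refine ⟨List.pairwise_replicate.mpr (by simp), ih, ?_⟩
    intro a ha b hb
    have h1 := List.eq_of_mem_replicate ha
    have h2 := (mem_pvDesc l m b hb).2
    omega

-- ===== VERDICT (by name: the statement is the Claim_ definition above) =====
theorem solution_spec : Claim_equal_solution := by
  intro k tangerine _
  unfold Spec_solution solution solution_alt
  simp only []
  set freq := PySem.Dict.counter tangerine with hfreq
  cases hmax : PySem.List.max? freq.values (fun x => x) with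
  | none =>
    have hnil : freq.values = [] := (PySem.List.max?_eq_none_iff freq.values (fun x => x)).mp hmax
    have hitems : freq.items = [] := by
      have : freq.items.map (·.2) = [] := hnil
      exact List.map_eq_nil_iff.mp this
    rw [hitems]
    rfl
  | some m =>
    -- every value of the counter is a positive count bounded by the maximum m
    have hcov : ∀ x ∈ freq.values, 1 ≤ x ∧ x ≤ m := by
      intro x hx
      refine ⟨?_, PySem.List.max?_isMax hmax x hx⟩
      have : freq.items = (PySem.Set.ofList tangerine).map
          (fun kk => (kk, (tangerine.count kk : Int))) := PySem.Dict.items_counter tangerine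
      have hx' : x ∈ freq.items.map (·.2) := hx
      rw [this] at hx'
      simp only [List.map_map, List.mem_map] at hx'
      obtain ⟨kk, hk, hkx⟩ := hx'
      have hkmem : kk ∈ tangerine := (PySem.Set.mem_ofList tangerine kk).mp hk
      have : 0 < tangerine.count kk := List.count_pos_iff.mpr hkmem
      simp only [Function.comp] at hkx
      omega
    have hm1 : 1 ≤ m := (hcov m (PySem.List.max?_mem hmax)).1
    have hmnat : ((m.toNat : Int)) = m := Int.toNat_of_nonneg (by omega)
    have hcov' : ∀ x ∈ freq.values, 1 ≤ x ∧ x ≤ ((m.toNat : Nat) : Int) := by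
      intro x hx; rw [hmnat]; exact hcov x hx
    -- the descending bucket list equals the sorted-by-count-descending value list
    have hkey : ((PySem.List.sorted freq.items (fun kv => kv.2) true).map (·.2))
        = pvDesc freq.values m.toNat := by
      have hpairA : (List.map (fun kv : Int × Int => kv.2)
          (PySem.List.sorted freq.items (fun kv => kv.2) true)).Pairwise
            (fun a b : Int => b ≤ a) :=
        List.Pairwise.map (fun kv : Int × Int => kv.2) (fun {a b} h => h)
          (PySem.List.sorted_pairwise_rev freq.items (fun kv => kv.2))
      have hperm : (List.map (fun kv : Int × Int => kv.2)
          (PySem.List.sorted freq.items (fun kv => kv.2) true)).Perm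
            (pvDesc freq.values m.toNat) :=
        (List.Perm.map (fun kv : Int × Int => kv.2)
          (PySem.List.sorted_perm freq.items (fun kv => kv.2) true)).trans
          (perm_pvDesc freq.values m.toNat hcov').symm
      exact List.Perm.eq_of_pairwise (fun a b _ _ h1 h2 => le_antisymm h2 h1)
        hpairA (pairwise_pvDesc freq.values m.toNat) hperm
    rw [goA_eq_scan, hkey, ← goB_eq_scan]
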